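-- pv_equiv track=rewrite | github.com/justant/WaggleBot | ai_worker/video.py | _assign_transitions
-- ===== SOURCE A (Python) =====
-- def _assign_transitions(n: int, custom: list[str] | None) -> list[str]:
--     """N개 이미지에 대한 N-1개 장면 전환 효과를 결정한다.
--
--     전환 전략:
--     - 첫 전환 (hook → body): circleopen — 주의 집중
--     - 마지막 전환 (body → closer): fadeblack — 마무리
--     - 중간 전환: slideleft / dissolve / fade 순환
--     """
--     n_trans = n - 1
--     if n_trans <= 0:
--         return []
--     if custom and len(custom) == n_trans:
--         return custom
--
--     _MID_CYCLE = ("slideleft", "dissolve", "fade")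
--     result: list[str] = []
--     mid_idx = 0
--     for i in range(n_trans):
--         if n_trans == 1:
--             result.append("circleopen")
--         elif i == 0:
--             result.append("circleopen")
--         elif i == n_trans - 1:
--             result.append("fadeblack")
--         else:
--             result.append(_MID_CYCLE[mid_idx % len(_MID_CYCLE)])
--             mid_idx += 1
--     return result
-- ===== SOURCE B (Python) =====
-- def _assign_transitions(n: int, custom: list[str] | None) -> list[str]:
--     n_trans = n - 1
--     if n_trans <= 0:
--         return []
--     if custom and len(custom) == n_trans:
--         return custom
--     if n_trans == 1:
--         return ["circleopen"]
--     # Tile the 3-element cycle enough times, then truncate with a slice: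
--     # no per-element indexing or modulo arithmetic at all.
--     cycle = ["slideleft", "dissolve", "fade"]
--     middle = (cycle * ((n_trans + 1) // 3))[: n_trans - 2]
--     return ["circleopen"] + middle + ["fadeblack"]
-- ===== Notes on version B (the rewrite author's own statement) =====
-- stated objective: alternative
-- what changed: Replaces A's per-index if/elif loop with its mid_idx counter by tiling: the 3-effect cycle is replicated with list multiplication and truncated by a slice, so no element-wise branching or modulo indexing happens; first and last effects are attached literally.
import Mathlib
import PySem

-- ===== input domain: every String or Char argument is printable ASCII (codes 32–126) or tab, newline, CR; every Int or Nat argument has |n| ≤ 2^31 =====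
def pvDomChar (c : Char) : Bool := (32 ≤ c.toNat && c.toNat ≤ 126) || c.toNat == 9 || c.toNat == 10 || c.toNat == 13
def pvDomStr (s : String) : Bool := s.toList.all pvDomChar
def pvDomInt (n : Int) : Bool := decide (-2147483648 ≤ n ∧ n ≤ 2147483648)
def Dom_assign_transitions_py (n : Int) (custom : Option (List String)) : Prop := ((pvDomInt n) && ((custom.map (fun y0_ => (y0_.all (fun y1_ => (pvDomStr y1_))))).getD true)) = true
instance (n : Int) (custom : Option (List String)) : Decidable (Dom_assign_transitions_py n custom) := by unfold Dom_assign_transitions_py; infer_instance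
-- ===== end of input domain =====

-- B builds the middle by tiling the 3-effect cycle (list multiplication) and
-- truncating with a slice, instead of A's per-index if/elif loop with a
-- mid_idx counter (objective: alternative construction, same cost).

-- ===== PORT A =====
def pvMidCycle : List String := ["slideleft", "dissolve", "fade"]

-- loop body of A's 'for i in range(n_trans)'; state = (result, mid_idx)
def pvStepA (m : Int) (st : List String × Int) (i : Int) : List String × Int :=
  if m == 1 then (st.1 ++ ["circleopen"], st.2)
  else if i == 0 then (st.1 ++ ["circleopen"], st.2)
  else if i == m - 1 then (st.1 ++ ["fadeblack"], st.2)
  else (st.1 ++ [PySem.List.pyGetD pvMidCycle (PySem.Int.mod st.2 3) ""], st.2 + 1)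
  -- mid_idx % 3 is always in range, so pyGetD's default "" is never used

def assign_transitions_py (n : Int) (custom : Option (List String)) : List String :=
  let m := n - 1
  if m ≤ 0 then []
  else if (match custom with | none => false | some c => !c.isEmpty && ((c.length : Int) == m)) then
    custom.getD []
  else ((PySem.List.pyRange 0 m 1).foldl (pvStepA m) ([], 0)).1

-- ===== PORT B =====
def assign_transitions_py_alt (n : Int) (custom : Option (List String)) : List String :=
  let m := n - 1
  if m ≤ 0 then []
  else if (match custom with | none => false | some c => !c.isEmpty && ((c.length : Int) == m)) then
    custom.getD []
  else if m == 1 then ["circleopen"]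
  else
    -- cycle * ((n_trans + 1) // 3) is list multiplication; [: n_trans - 2] the slice
    let middle := PySem.List.slice
      (List.flatten (List.replicate (PySem.Int.floordiv (m + 1) 3).toNat pvMidCycle))
      none (some (m - 2))
    ["circleopen"] ++ middle ++ ["fadeblack"]

-- ===== PRECONDITION & SPEC =====
def Spec_assign_transitions_py (n : Int) (custom : Option (List String)) (out : List String) : Prop := out = assign_transitions_py_alt n custom
instance (n : Int) (custom : Option (List String)) (out : List String) : Decidable (Spec_assign_transitions_py n custom out) := by unfold Spec_assign_transitions_py; infer_instance

-- ===== CLAIM (what is proved, stated in full; the proofs are below) =====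
def Claim_equal_assign_transitions_py : Prop := ∀ (n : Int) (custom : Option (List String)), Dom_assign_transitions_py n custom → Spec_assign_transitions_py n custom (assign_transitions_py n custom)

-- ===== LEMMAS AND PROOFS =====

-- the value A's middle branch appends at its t-th middle iteration
def pvF (t : Nat) : String := PySem.List.pyGetD pvMidCycle (PySem.Int.mod (t : Int) 3) ""

lemma pvF_add_three (t : Nat) : pvF (t + 3) = pvF t := by
  unfold pvF
  congr 1
  simp only [PySem.Int.mod_eq_emod_of_pos (by norm_num : (0:Int) < 3)]
  push_cast
  omega

-- A's middle iterations: each index i with 1 ≤ i ≤ m-2 appends cycle[mid%3] and bumps mid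
lemma pv_mid_fold (m : Int) (hm : 2 ≤ m) :
    ∀ (j : Nat), (j : Int) ≤ m - 2 → ∀ (r : List String) (c : Nat),
    (PySem.List.pyRange (m - 1 - j) (m - 1) 1).foldl (pvStepA m) (r, (c : Int))
      = (r ++ (List.range j).map (fun t : Nat => pvF (c + t)), ((c + j : Nat) : Int)) := by
  intro j
  induction j with
  | zero =>
      intro _ r c
      simp
  | succ j ih =>
      intro hj r c
      have hcons : PySem.List.pyRange (m - 1 - (j+1 : Nat)) (m - 1) 1
          = (m - 1 - (j+1 : Nat)) :: PySem.List.pyRange (m - 1 - (j+1 : Nat) + 1) (m - 1) 1 :=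
        PySem.List.pyRange_one_cons (by push_cast; omega)
      have harg : m - 1 - (j+1 : Nat) + 1 = m - 1 - (j : Nat) := by push_cast; omega
      rw [hcons, List.foldl_cons, harg]
      have hstep : pvStepA m (r, (c : Int)) (m - 1 - (j+1 : Nat))
          = (r ++ [pvF c], ((c + 1 : Nat) : Int)) := by
        simp only [pvStepA, beq_iff_eq, pvF]
        rw [if_neg (by omega), if_neg (by push_cast; omega), if_neg (by push_cast; omega)]
        simp
      rw [hstep, ih (by push_cast at hj ⊢; omega)]
      rw [Prod.mk.injEq]
      refine ⟨?_, by push_cast; ring⟩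
      rw [List.range_succ_eq_map, List.map_cons, List.map_map, List.append_assoc,
          List.singleton_append]
      congr 1
      congr 1
      apply List.map_congr_left
      intro t _
      simp only [Function.comp]
      congr 1
      omega

-- A's whole loop, first/middle/last split
lemma pv_loop_eq (m : Int) (h0 : 0 < m) :
    ((PySem.List.pyRange 0 m 1).foldl (pvStepA m) ([], 0)).1
      = if m == 1 then ["circleopen"]
        else "circleopen" :: ((List.range (m - 2).toNat).map pvF ++ ["fadeblack"]) := by
  by_cases h1 : m = 1
  · subst h1
    simp [PySem.List.pyRange_one_cons (by norm_num : (0:Int) < 1),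
          PySem.List.pyRange_one_eq_nil (by norm_num : (1:Int) ≤ 1), pvStepA]
  · have hm2 : 2 ≤ m := by omega
    have hB : (m == 1) = false := by simp [h1]
    rw [hB]
    simp only [Bool.false_eq_true, if_false]
    have hsplit : PySem.List.pyRange 0 m 1
        = 0 :: (PySem.List.pyRange 1 (m - 1) 1 ++ [m - 1]) := by
      rw [PySem.List.pyRange_one_cons (by omega : (0:Int) < m)]
      norm_num
      rw [PySem.List.pyRange_one_append 1 (m-1) m (by omega) (by omega)]
      congr 1
      rw [PySem.List.pyRange_one_cons (by omega : m - 1 < m),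
          PySem.List.pyRange_one_eq_nil (by omega : m ≤ m - 1 + 1)]
    rw [hsplit]
    simp only [List.foldl_cons, List.foldl_append]
    have hfirst : pvStepA m ([], 0) 0 = (["circleopen"], ((0 : Nat) : Int)) := by
      simp [pvStepA, h1]
    rw [hfirst]
    have hrange1 : PySem.List.pyRange 1 (m - 1) 1
        = PySem.List.pyRange (m - 1 - (((m - 2).toNat : Nat) : Int)) (m - 1) 1 := by
      congr 1
      omega
    rw [hrange1, pv_mid_fold m hm2 (m - 2).toNat (by omega) ["circleopen"] 0,
        List.foldl_nil]
    have hlast : ∀ (r : List String) (c : Int),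
        pvStepA m (r, c) (m - 1) = (r ++ ["fadeblack"], c) := by
      intro r c
      simp only [pvStepA, beq_iff_eq]
      rw [if_neg h1, if_neg (by omega : ¬ m - 1 = 0)]
      simp
    rw [hlast]
    simp

-- B's tiled-and-truncated middle is exactly A's sequence of middle appends
lemma pv_tile (k : Nat) : ∀ (j : Nat), j ≤ 3 * k →
    (List.flatten (List.replicate k pvMidCycle)).take j = (List.range j).map pvF := by
  induction k with
  | zero => intro j hj; interval_cases j; simp
  | succ k ih =>
      intro j hj
      rw [List.replicate_succ, List.flatten_cons]
      by_cases h3 : j ≤ 3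
      · interval_cases j <;> simp [pvF, pvMidCycle, PySem.List.pyGetD, PySem.Int.mod,
          PySem.List.pyGet?, PySem.List.pyIdx?, List.range_succ]
      · rw [List.take_append]
        have hlen : pvMidCycle.length = 3 := by rfl
        rw [hlen, List.take_of_length_le (by omega), ih (j - 3) (by omega)]
        have hr : List.range j = List.range 3 ++ (List.range (j - 3)).map (3 + ·) := by
          rw [← List.range_add]
          congr 1
          omega
        rw [hr, List.map_append, List.map_map]
        congr 1
        apply List.map_congr_left
        intro t _
        simp only [Function.comp]
        rw [show 3 + t = t + 3 by omega, pvF_add_three]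

-- ===== VERDICT (by name: the statement is the Claim_ definition above) =====
theorem assign_transitions_py_spec : Claim_equal_assign_transitions_py := by
  intro n custom _
  unfold Spec_assign_transitions_py assign_transitions_py assign_transitions_py_alt
  by_cases h0 : n - 1 ≤ 0
  · simp [h0]
  · have key : ∀ hcond : True,
        ((PySem.List.pyRange 0 (n-1) 1).foldl (pvStepA (n-1)) ([], 0)).1
        = (if (n-1) == 1 then ["circleopen"]
           else ["circleopen"] ++ PySem.List.slice
             (List.flatten (List.replicate (PySem.Int.floordiv ((n-1) + 1) 3).toNat pvMidCycle))
             none (some ((n-1) - 2)) ++ ["fadeblack"]) := by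
      intro _
      rw [pv_loop_eq (n-1) (by omega)]
      by_cases h1 : n - 1 = 1
      · simp [h1]
      · have hm2 : 2 ≤ n - 1 := by omega
        have hB : ((n-1) == 1) = false := by simp [h1]
        rw [hB]
        simp only [Bool.false_eq_true, if_false]
        rw [PySem.List.slice_to _ (by omega : (0:Int) ≤ (n-1) - 2)]
        have hk : ((n-1) - 2).toNat ≤ 3 * (PySem.Int.floordiv ((n-1) + 1) 3).toNat := by
          rw [PySem.Int.floordiv_eq_ediv_of_pos (by norm_num : (0:Int) < 3)]
          omega
        rw [pv_tile _ _ hk]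
        simp
    cases custom with
    | none =>
        simp only [if_neg h0, Bool.false_eq_true, if_false]
        exact key trivial
    | some c =>
        by_cases hc : (!c.isEmpty && ((c.length : Int) == n - 1)) = true
        · simp only [if_neg h0, hc, if_true]
        · simp only [if_neg h0, hc, Bool.false_eq_true, if_false]
          exact key trivial
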